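-- pv_equiv track=rewrite | github.com/gmazu/calypso-integration-landscape | Gantt/Manim/gantt_timeline_v4.0.0.py | filter_by_id_with_context
-- ===== SOURCE A (Python) =====
-- def filter_by_id_with_context(tasks: list[list], task_id: int, max_depth: int | None = None) -> list[list]:
--     """
--     Filtra la tarea con el ID dado más sus hijos directos.
--     Retorna la tarea padre y todas las tareas con nivel mayor hasta encontrar
--     otra tarea del mismo nivel o menor.
--     """
--     result: list[list] = []
--     seen: set[tuple] = set()
--     stack: list[list] = []
--
--     found_idx = None
--     parent_level = None
--
--     for idx, row in enumerate(tasks):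
--         level = row[1]
--         while stack and stack[-1][1] >= level:
--             stack.pop()
--         stack.append(row)
--         if row[0] == task_id:
--             found_idx = idx
--             parent_level = level
--             for parent in stack:
--                 key = tuple(parent)
--                 if key not in seen:
--                     result.append(parent)
--                     seen.add(key)
--             break
--
--     if found_idx is None or parent_level is None:
--         return []
--
--     # Agregar hijos (nivel > parent_level) hasta encontrar mismo nivel o menor
--     for row in tasks[found_idx + 1:]:
--         if row[1] <= parent_level:
--             break
--         if max_depth is not None and row[1] > parent_level + max_depth:
--             continue
--         key = tuple(row)
--         if key not in seen:
--             result.append(row)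
--             seen.add(key)
--
--     return result
-- ===== SOURCE B (Python) =====
-- def filter_by_id_with_context(tasks: list[list], task_id: int, max_depth: int | None = None) -> list[list]:
--     # Phase 1: index of the first row whose id matches.
--     found_idx = None
--     for i, row in enumerate(tasks):
--         if row[0] == task_id:
--             found_idx = i
--             break
--     if found_idx is None:
--         return []
--     target = tasks[found_idx]
--     parent_level = target[1]
--     # Phase 2: ancestors = running strict minima, scanning the prefix right-to-left.
--     ancestors = []
--     m = parent_level
--     for row in reversed(tasks[:found_idx]):
--         if row[1] < m:
--             ancestors.insert(0, row)
--             m = row[1]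
--     # Phase 3: contiguous block of rows deeper than the target, then the depth cutoff.
--     block = []
--     for row in tasks[found_idx + 1:]:
--         if row[1] <= parent_level:
--             break
--         block.append(row)
--     if max_depth is not None:
--         block = [r for r in block if r[1] <= parent_level + max_depth]
--     # Phase 4: one order-preserving dedup pass over the whole candidate list.
--     result, seen = [], set()
--     for row in ancestors + [target] + block:
--         key = tuple(row)
--         if key not in seen:
--             result.append(row)
--             seen.add(key)
--     return result
-- ===== Notes on version B (the rewrite author's own statement) =====
-- stated objective: alternative
-- what changed: B replaces A's single interleaved pass (monotonic stack maintained per row, dedup and break inside the loops) by four staged passes: find the target's index, reconstruct ancestors as running strict minima scanning the prefix backwards, cut the descendant block with a takewhile-style loop followed by a separate depth filter, then one final order-preserving dedup pass over the concatenated candidates.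
-- outside the precondition, e.g. on filter_by_id_with_context([[1, 0], [2, 0], []], 1, None): A returns [[1, 0]], B returns [[1, 0]]
import Mathlib
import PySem

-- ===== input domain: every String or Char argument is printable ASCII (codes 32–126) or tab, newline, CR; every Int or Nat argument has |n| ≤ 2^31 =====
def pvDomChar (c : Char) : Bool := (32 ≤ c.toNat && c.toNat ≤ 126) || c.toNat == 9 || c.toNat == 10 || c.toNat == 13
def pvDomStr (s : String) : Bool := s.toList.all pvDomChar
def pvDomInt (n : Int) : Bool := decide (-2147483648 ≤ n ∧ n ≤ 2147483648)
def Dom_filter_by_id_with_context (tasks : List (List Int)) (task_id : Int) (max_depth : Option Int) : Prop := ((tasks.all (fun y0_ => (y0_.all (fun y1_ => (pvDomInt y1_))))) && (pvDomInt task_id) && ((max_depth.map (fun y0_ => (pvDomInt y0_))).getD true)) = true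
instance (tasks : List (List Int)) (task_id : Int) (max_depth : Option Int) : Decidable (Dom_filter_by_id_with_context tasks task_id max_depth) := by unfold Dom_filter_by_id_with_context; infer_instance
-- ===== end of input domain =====

-- B replaces A's interleaved monotonic stack + in-loop dedup by four staged passes:
-- index find, backward running-minima ancestors, takewhile block + depth filter, one final dedup
-- (objective: alternative decomposition, same cost).

-- ===== PORT A =====
-- row[0] / row[1]; total via getD, exact on Pre_ (every row has length ≥ 2)
def pvRow0 (row : List Int) : Int := (PySem.List.pyGet? row 0).getD 0
def pvRow1 (row : List Int) : Int := (PySem.List.pyGet? row 1).getD 0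

-- 'while stack and stack[-1][1] >= level: stack.pop()' then 'stack.append(row)'; stack held top-first
def pvStep (stack : List (List Int)) (row : List Int) : List (List Int) :=
  row :: stack.dropWhile (fun x => decide (pvRow1 row ≤ pvRow1 x))

-- A's first loop: returns (stack at the break, parent_level, rows after the match)
def pvFindA (task_id : Int) : List (List Int) → List (List Int) → Option (List (List Int) × Int × List (List Int))
  | [], _ => none
  | row :: rest, stack =>
    let stack' := pvStep stack row
    if pvRow0 row == task_id then some (stack', pvRow1 row, rest)
    else pvFindA task_id rest stack'

-- 'for parent in stack: if key not in seen: result.append(parent); seen.add(key)'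
def pvDedupA (rows : List (List Int)) (result : List (List Int)) (seen : PySem.Set (List Int)) : List (List Int) × PySem.Set (List Int) :=
  rows.foldl (fun acc row =>
    if PySem.Set.contains acc.2 row then acc else (acc.1 ++ [row], PySem.Set.add acc.2 row)) (result, seen)

-- A's second loop: descendants with break / max_depth continue / seen check
def pvDescA (max_depth : Option Int) (parent_level : Int) : List (List Int) → List (List Int) → PySem.Set (List Int) → List (List Int)
  | [], result, _ => result
  | row :: rest, result, seen =>
    if pvRow1 row ≤ parent_level then result
    else if (match max_depth with | some d => decide (parent_level + d < pvRow1 row) | none => false) then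
      pvDescA max_depth parent_level rest result seen
    else if PySem.Set.contains seen row then pvDescA max_depth parent_level rest result seen
    else pvDescA max_depth parent_level rest (result ++ [row]) (PySem.Set.add seen row)

def filter_by_id_with_context (tasks : List (List Int)) (task_id : Int) (max_depth : Option Int) : List (List Int) :=
  match pvFindA task_id tasks [] with
  | none => []
  | some (stack, parent_level, rest) =>
    -- 'for parent in stack' iterates bottom-to-top: our stack is top-first, hence .reverse
    let rs := pvDedupA stack.reverse [] PySem.Set.empty
    pvDescA max_depth parent_level rest rs.1 rs.2

-- ===== PORT B =====
-- phase 1: index of the first row whose id matches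
def pvFindIdxB (task_id : Int) : List (List Int) → Option Nat
  | [] => none
  | row :: rest =>
    if pvRow0 row == task_id then some 0 else (pvFindIdxB task_id rest).map (· + 1)

-- phase 2: 'for row in reversed(tasks[:found_idx]): if row[1] < m: ancestors.insert(0, row); m = row[1]'
-- (argument is the reversed prefix; insert(0,·) makes later picks land in front)
def pvMinsB : List (List Int) → Int → List (List Int)
  | [], _ => []
  | row :: rest, m =>
    if pvRow1 row < m then pvMinsB rest (pvRow1 row) ++ [row] else pvMinsB rest m

-- phase 3a: 'for row in tasks[found_idx+1:]: if row[1] <= parent_level: break; block.append(row)'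
def pvBlockB (parent_level : Int) : List (List Int) → List (List Int)
  | [] => []
  | row :: rest =>
    if pvRow1 row ≤ parent_level then [] else row :: pvBlockB parent_level rest

-- phase 3b: 'block = [r for r in block if r[1] <= parent_level + max_depth]' (when max_depth given)
def pvDepthFilterB (max_depth : Option Int) (parent_level : Int) (block : List (List Int)) : List (List Int) :=
  match max_depth with
  | none => block
  | some d => block.filter (fun r => decide (pvRow1 r ≤ parent_level + d))

-- phase 4: the single order-preserving dedup pass
def pvDedupB : List (List Int) → List (List Int) → PySem.Set (List Int) → List (List Int)
  | [], result, _ => result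
  | row :: rest, result, seen =>
    if PySem.Set.contains seen row then pvDedupB rest result seen
    else pvDedupB rest (result ++ [row]) (PySem.Set.add seen row)

def filter_by_id_with_context_alt (tasks : List (List Int)) (task_id : Int) (max_depth : Option Int) : List (List Int) :=
  match pvFindIdxB task_id tasks with
  | none => []
  | some i =>
    let target := tasks.getD i []          -- tasks[found_idx]
    let parent_level := pvRow1 target
    let ancestors := pvMinsB (tasks.take i).reverse parent_level
    let block := pvDepthFilterB max_depth parent_level (pvBlockB parent_level (tasks.drop (i + 1)))
    pvDedupB (ancestors ++ [target] ++ block) [] PySem.Set.empty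

-- ===== PRECONDITION & SPEC =====
-- Pre_ excludes rows with fewer than 2 entries: A reads row[0] and row[1] of every row it scans
-- and raises IndexError there; only short rows lying after A's early break are never scanned.
def Pre_filter_by_id_with_context (tasks : List (List Int)) (task_id : Int) (max_depth : Option Int) : Prop :=
  ∀ row ∈ tasks, 2 ≤ row.length
instance (tasks : List (List Int)) (task_id : Int) (max_depth : Option Int) : Decidable (Pre_filter_by_id_with_context tasks task_id max_depth) := by unfold Pre_filter_by_id_with_context; infer_instance

def pvWitness_filter_by_id_with_context : List (List Int) × Int × Option Int :=
  ([[1, 0], [2, 1], [3, 2], [4, 1]], 1, none)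

def Spec_filter_by_id_with_context (tasks : List (List Int)) (task_id : Int) (max_depth : Option Int) (out : List (List Int)) : Prop := out = filter_by_id_with_context_alt tasks task_id max_depth
instance (tasks : List (List Int)) (task_id : Int) (max_depth : Option Int) (out : List (List Int)) : Decidable (Spec_filter_by_id_with_context tasks task_id max_depth out) := by unfold Spec_filter_by_id_with_context; infer_instance

-- ===== CLAIM (what is proved, stated in full; the proofs are below) =====
def Claim_equal_filter_by_id_with_context : Prop := ∀ (tasks : List (List Int)) (task_id : Int) (max_depth : Option Int), Dom_filter_by_id_with_context tasks task_id max_depth → Pre_filter_by_id_with_context tasks task_id max_depth → Spec_filter_by_id_with_context tasks task_id max_depth (filter_by_id_with_context tasks task_id max_depth)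

-- ===== LEMMAS AND PROOFS =====

-- proof-only: splitter form of the first scan (rows before the match, the match, rows after)
def pvFindSplit (task_id : Int) : List (List Int) → Option (List (List Int) × List Int × List (List Int))
  | [] => none
  | row :: rest =>
    if pvRow0 row == task_id then some ([], row, rest)
    else match pvFindSplit task_id rest with
      | none => none
      | some (pre, t, post) => some (row :: pre, t, post)

-- proof-only: the ancestor chain held top-first (newest first)
def pvChain : List (List Int) → Int → List (List Int)
  | [], _ => []
  | row :: rest, cur =>
    if pvRow1 row < cur then row :: pvChain rest (pvRow1 row) else pvChain rest cur

-- proof-only: pvChain generalized with a leftover stack consumed by dropWhile at the end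
def pvChainAux : List (List Int) → Int → List (List Int) → List (List Int)
  | [], c, st => st.dropWhile (fun x => decide (c ≤ pvRow1 x))
  | row :: rest, c, st =>
    if pvRow1 row < c then row :: pvChainAux rest (pvRow1 row) st else pvChainAux rest c st

theorem dropWhile_dropWhile (l : List (List Int)) (c r : Int) (h : c ≤ r) :
    (l.dropWhile (fun x => decide (r ≤ pvRow1 x))).dropWhile (fun x => decide (c ≤ pvRow1 x))
      = l.dropWhile (fun x => decide (c ≤ pvRow1 x)) := by
  induction l with
  | nil => rfl
  | cons x xs ih =>
    by_cases hx : r ≤ pvRow1 x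
    · have hc : c ≤ pvRow1 x := le_trans h hx
      simp [List.dropWhile, hx, hc, ih]
    · simp [List.dropWhile, hx]

theorem chainAux_append (xs : List (List Int)) (r : List Int) (c : Int) (st : List (List Int)) :
    pvChainAux (xs ++ [r]) c st = pvChainAux xs c (pvStep st r) := by
  induction xs generalizing c with
  | nil =>
    by_cases h : pvRow1 r < c
    · have : ¬ c ≤ pvRow1 r := not_le.mpr h
      simp [pvChainAux, pvStep, h, this]
    · have hcr : c ≤ pvRow1 r := not_lt.mp h
      simp [pvChainAux, pvStep, h, hcr, dropWhile_dropWhile _ _ _ hcr]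
  | cons x xs ih =>
    by_cases h : pvRow1 x < c <;> simp [pvChainAux, h, ih]

theorem chainAux_nil_st (xs : List (List Int)) (c : Int) :
    pvChainAux xs c [] = pvChain xs c := by
  induction xs generalizing c with
  | nil => rfl
  | cons x xs ih =>
    by_cases h : pvRow1 x < c <;> simp [pvChainAux, pvChain, h, ih]

theorem stack_chainAux (p : List (List Int)) (c : Int) (st : List (List Int)) :
    pvChainAux p.reverse c st = (List.foldl pvStep st p).dropWhile (fun x => decide (c ≤ pvRow1 x)) := by
  induction p generalizing st with
  | nil => rfl
  | cons r p ih =>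
    have : (r :: p).reverse = p.reverse ++ [r] := by simp
    rw [this, chainAux_append, List.foldl_cons, ih]

theorem findA_split (task_id : Int) : ∀ (ts p st : List (List Int)),
    pvFindA task_id ts (List.foldl pvStep st p) =
      (pvFindSplit task_id ts).map (fun x =>
        (x.2.1 :: pvChainAux ((p ++ x.1).reverse) (pvRow1 x.2.1) st, pvRow1 x.2.1, x.2.2)) := by
  intro ts
  induction ts with
  | nil => intro p st; rfl
  | cons row rest ih =>
    intro p st
    by_cases h : pvRow0 row == task_id
    · simp [pvFindA, pvFindSplit, h]
      rw [stack_chainAux]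
      rfl
    · have hstep : pvStep (List.foldl pvStep st p) row = List.foldl pvStep st (p ++ [row]) := by
        simp [List.foldl_append]
      simp only [pvFindA, pvFindSplit, h, Bool.false_eq_true, ite_false]
      rw [hstep, ih (p ++ [row]) st]
      cases hfb : pvFindSplit task_id rest with
      | none => rfl
      | some x =>
        simp [List.append_assoc]

-- the index search determines the split
theorem findSplit_idx (task_id : Int) : ∀ (ts : List (List Int)),
    pvFindSplit task_id ts =
      (pvFindIdxB task_id ts).map (fun i => (ts.take i, ts.getD i [], ts.drop (i + 1))) := by
  intro ts
  induction ts with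
  | nil => rfl
  | cons row rest ih =>
    by_cases h : pvRow0 row == task_id
    · simp [pvFindSplit, pvFindIdxB, h]
    · simp only [pvFindSplit, pvFindIdxB, h, Bool.false_eq_true, ite_false]
      rw [ih]
      cases hfi : pvFindIdxB task_id rest with
      | none => rfl
      | some i => simp [List.getD]

-- the backward running-minima pass builds the reversed chain
theorem mins_eq_chain_rev (xs : List (List Int)) (m : Int) :
    pvMinsB xs m = (pvChain xs m).reverse := by
  induction xs generalizing m with
  | nil => rfl
  | cons x xs ih =>
    by_cases h : pvRow1 x < m <;> simp [pvMinsB, pvChain, h, ih]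

-- one dedup pass over xs ++ ys = dedup of xs (pair form), continued on ys
theorem dedupB_append (xs ys result : List (List Int)) (seen : PySem.Set (List Int)) :
    pvDedupB (xs ++ ys) result seen = pvDedupB ys (pvDedupA xs result seen).1 (pvDedupA xs result seen).2 := by
  induction xs generalizing result seen with
  | nil => rfl
  | cons x xs ih =>
    simp only [List.cons_append, pvDedupB]
    split_ifs with h <;> simp [PySem.Set.contains] at h <;>
      rw [ih] <;> simp [pvDedupA, List.foldl_cons, h]

-- A's descendant loop = takewhile block, depth filter, then the dedup pass
theorem descA_staged (max_depth : Option Int) (parent_level : Int) :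
    ∀ (ts result : List (List Int)) (seen : PySem.Set (List Int)),
      pvDescA max_depth parent_level ts result seen =
        pvDedupB (pvDepthFilterB max_depth parent_level (pvBlockB parent_level ts)) result seen := by
  intro ts
  induction ts with
  | nil => intro result seen; cases max_depth <;> rfl
  | cons row rest ih =>
    intro result seen
    by_cases h1 : pvRow1 row ≤ parent_level
    · cases max_depth <;> simp [pvDescA, pvBlockB, pvDepthFilterB, h1, pvDedupB]
    · cases max_depth with
      | none =>
        simp only [pvDescA, pvBlockB, pvDepthFilterB, h1, ite_false]
        by_cases h3 : PySem.Set.contains seen row <;>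
          simp [pvDedupB, ih, pvDepthFilterB]
      | some d =>
        by_cases h2 : parent_level + d < pvRow1 row
        · have hnle : ¬ pvRow1 row ≤ parent_level + d := not_le.mpr h2
          simp [pvDescA, pvBlockB, pvDepthFilterB, h1, h2, hnle, ih]
        · have hle : pvRow1 row ≤ parent_level + d := not_lt.mp h2
          by_cases h3 : PySem.Set.contains seen row <;>
            simp [pvDescA, pvBlockB, pvDepthFilterB, pvDedupB, h1, h2, hle, ih]

-- ===== VERDICT (by name: the statement is the Claim_ definition above) =====
theorem filter_by_id_with_context_spec : Claim_equal_filter_by_id_with_context := by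
  intro tasks task_id max_depth _ _
  unfold Spec_filter_by_id_with_context
  unfold filter_by_id_with_context filter_by_id_with_context_alt
  have h := findA_split task_id tasks [] []
  simp only [List.foldl_nil] at h
  rw [h, findSplit_idx]
  cases hfi : pvFindIdxB task_id tasks with
  | none => rfl
  | some i =>
    simp only [Option.map_some, List.nil_append]
    rw [chainAux_nil_st]
    have hrev : ((tasks.getD i []) :: pvChain (tasks.take i).reverse (pvRow1 (tasks.getD i []))).reverse
        = pvMinsB (tasks.take i).reverse (pvRow1 (tasks.getD i [])) ++ [tasks.getD i []] := by
      simp [mins_eq_chain_rev]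
    simp only [hrev]
    rw [descA_staged]
    rw [show pvMinsB (tasks.take i).reverse (pvRow1 (tasks.getD i [])) ++ [tasks.getD i []] ++
          pvDepthFilterB max_depth (pvRow1 (tasks.getD i [])) (pvBlockB (pvRow1 (tasks.getD i [])) (tasks.drop (i + 1)))
        = (pvMinsB (tasks.take i).reverse (pvRow1 (tasks.getD i [])) ++ [tasks.getD i []]) ++
          pvDepthFilterB max_depth (pvRow1 (tasks.getD i [])) (pvBlockB (pvRow1 (tasks.getD i [])) (tasks.drop (i + 1)))
      from by simp [List.append_assoc]]
    rw [dedupB_append]
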